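-- pv_equiv track=rewrite | github.com/walterJose15/CursoPython2024 | 31-FUncionesDInamicas/app.py | suma_cuadrado_cubos
-- ===== SOURCE A (Python) =====
-- def suma_cuadrado_cubos(n):
--     suma_cuadrado = 0
--     suma_cubos = 0
--     for i in range (1, n+1):
--         if i % 2 == 0:
--             suma_cuadrado += i **2
--         else:
--             suma_cubos += i **3
--     return suma_cuadrado, suma_cubos
-- ===== SOURCE B (Python) =====
-- def suma_cuadrado_cubos(n):
--     if n < 1:
--         return 0, 0
--     m = n // 2          # number of even terms 2,4,...,2m
--     k = (n + 1) // 2    # number of odd terms 1,3,...,2k-1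
--     return (2 * m * (m + 1) * (2 * m + 1)) // 3, k * k * (2 * k * k - 1)
-- ===== Notes on version B (the rewrite author's own statement) =====
-- stated objective: faster
-- what changed: replaces the O(n) loop over range(1,n+1) with closed-form arithmetic formulas for the sum of even squares and the sum of odd cubes
import Mathlib
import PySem

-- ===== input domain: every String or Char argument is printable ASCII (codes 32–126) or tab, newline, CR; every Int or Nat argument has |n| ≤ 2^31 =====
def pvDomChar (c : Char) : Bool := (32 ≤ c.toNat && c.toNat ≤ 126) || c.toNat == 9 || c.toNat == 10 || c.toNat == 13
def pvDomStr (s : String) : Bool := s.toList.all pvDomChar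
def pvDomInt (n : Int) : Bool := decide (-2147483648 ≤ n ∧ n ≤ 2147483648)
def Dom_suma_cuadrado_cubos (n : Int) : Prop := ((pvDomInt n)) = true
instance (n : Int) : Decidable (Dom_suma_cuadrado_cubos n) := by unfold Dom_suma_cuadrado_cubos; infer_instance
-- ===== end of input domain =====

-- B replaces A's O(n) loop with closed-form formulas for the even-square and odd-cube sums (O(1)).


-- ===== PORT A =====
def suma_cuadrado_cubos (n : Int) : List Int :=
  let s := (PySem.List.pyRange 1 (n + 1) 1).foldl
    (fun (st : Int × Int) i =>
      if PySem.Int.mod i 2 = 0 then (st.1 + i ^ 2, st.2) else (st.1, st.2 + i ^ 3))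
    (0, 0)
  [s.1, s.2]

-- ===== PORT B =====
def suma_cuadrado_cubos_alt (n : Int) : List Int :=
  if n < 1 then [0, 0]
  else
    let m := PySem.Int.floordiv n 2
    let k := PySem.Int.floordiv (n + 1) 2
    [PySem.Int.floordiv (2 * m * (m + 1) * (2 * m + 1)) 3, k * k * (2 * k * k - 1)]

-- ===== PRECONDITION & SPEC =====
def Spec_suma_cuadrado_cubos (n : Int) (out : List Int) : Prop := out = suma_cuadrado_cubos_alt n
instance (n : Int) (out : List Int) : Decidable (Spec_suma_cuadrado_cubos n out) := by unfold Spec_suma_cuadrado_cubos; infer_instance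

-- ===== CLAIM (what is proved, stated in full; the proofs are below) =====
def Claim_equal_suma_cuadrado_cubos : Prop := ∀ (n : Int), Dom_suma_cuadrado_cubos n → Spec_suma_cuadrado_cubos n (suma_cuadrado_cubos n)

-- ===== LEMMAS AND PROOFS =====

-- A's loop body / loop, named for the proofs
def pvStep (st : Int × Int) (i : Int) : Int × Int :=
  if PySem.Int.mod i 2 = 0 then (st.1 + i ^ 2, st.2) else (st.1, st.2 + i ^ 3)

def pvLoop (n : Int) : Int × Int := (PySem.List.pyRange 1 (n + 1) 1).foldl pvStep (0, 0)

theorem pvLoop_closed (N : ℕ) :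
    3 * (pvLoop (N : Int)).1
        = 2 * ((N / 2 : ℕ) : ℤ) * (((N / 2 : ℕ) : ℤ) + 1) * (2 * ((N / 2 : ℕ) : ℤ) + 1)
    ∧ (pvLoop (N : Int)).2
        = (((N + 1) / 2 : ℕ) : ℤ) * (((N + 1) / 2 : ℕ) : ℤ) *
            (2 * ((((N + 1) / 2 : ℕ) : ℤ) * (((N + 1) / 2 : ℕ) : ℤ)) - 1) := by
  induction N with
  | zero => simp [pvLoop, PySem.List.pyRange_one_eq_nil]
  | succ N ih =>
    have hsplit : PySem.List.pyRange 1 ((N : ℤ) + 1 + 1) 1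
        = PySem.List.pyRange 1 ((N : ℤ) + 1) 1 ++ [(N : ℤ) + 1] := by
      exact PySem.List.pyRange_one_succ_right (by omega)
    have hloop : pvLoop ((N + 1 : ℕ) : Int) = pvStep (pvLoop (N : Int)) ((N : ℤ) + 1) := by
      unfold pvLoop
      push_cast
      rw [hsplit, List.foldl_append]
      rfl
    have hmod : PySem.Int.mod ((N : ℤ) + 1) 2 = (((N + 1) % 2 : ℕ) : ℤ) := by
      have := PySem.Int.mod_natCast (N + 1) 2
      push_cast at this ⊢
      exact this
    obtain ⟨iha, ihb⟩ := ih
    rcases Nat.even_or_odd (N + 1) with ⟨t, ht⟩ | ⟨t, ht⟩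
    · -- N + 1 = 2t : the new term is an even square
      have h1 : (N + 1) % 2 = 0 := by omega
      have h2 : N / 2 = t - 1 := by omega
      have h3 : (N + 1) / 2 = t := by omega
      have h4 : (N + 1 + 1) / 2 = t := by omega
      have hc : ((t - 1 : ℕ) : ℤ) = (t : ℤ) - 1 := by omega
      rw [h2, hc] at iha
      rw [h3] at ihb
      have hN : (N : ℤ) + 1 = 2 * (t : ℤ) := by omega
      rw [hloop, pvStep]
      split_ifs with hif
      · constructor
        · show 3 * ((pvLoop (N : Int)).1 + ((N : ℤ) + 1) ^ 2) = _
          rw [h3, hN]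
          nlinarith [iha]
        · show (pvLoop (N : Int)).2 = _
          rw [h4]
          exact ihb
      · exfalso
        rw [hmod, h1] at hif
        exact hif rfl
    · -- N + 1 = 2t + 1 : the new term is an odd cube
      have h1 : (N + 1) % 2 = 1 := by omega
      have h2 : N / 2 = t := by omega
      have h3 : (N + 1) / 2 = t := by omega
      have h4 : (N + 1 + 1) / 2 = t + 1 := by omega
      rw [h2] at iha
      rw [h3] at ihb
      have hN : (N : ℤ) + 1 = 2 * (t : ℤ) + 1 := by omega
      rw [hloop, pvStep]
      split_ifs with hif
      · exfalso
        rw [hmod, h1] at hif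
        exact absurd hif (by decide)
      · constructor
        · show 3 * (pvLoop (N : Int)).1 = _
          rw [h3]
          exact iha
        · show (pvLoop (N : Int)).2 + ((N : ℤ) + 1) ^ 3 = _
          rw [h4, hN]
          push_cast
          nlinarith [ihb]

theorem suma_cuadrado_cubos_eq_loop (n : Int) : suma_cuadrado_cubos n = [(pvLoop n).1, (pvLoop n).2] := rfl

-- ===== VERDICT (by name: the statement is the Claim_ definition above) =====
theorem suma_cuadrado_cubos_spec : Claim_equal_suma_cuadrado_cubos := by
  intro n _
  unfold Spec_suma_cuadrado_cubos suma_cuadrado_cubos_alt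
  by_cases hn : n < 1
  · rw [if_pos hn, suma_cuadrado_cubos_eq_loop]
    have : PySem.List.pyRange 1 (n + 1) 1 = [] := PySem.List.pyRange_one_eq_nil (by omega)
    simp [pvLoop, this]
  · rw [if_neg hn]
    have h0 : 0 ≤ n := by omega
    obtain ⟨N, rfl⟩ := Int.eq_ofNat_of_zero_le h0
    obtain ⟨hA, hB⟩ := pvLoop_closed N
    rw [suma_cuadrado_cubos_eq_loop]
    have hm : PySem.Int.floordiv (N : ℤ) 2 = ((N / 2 : ℕ) : ℤ) := by
      exact_mod_cast PySem.Int.floordiv_natCast N 2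
    have hk : PySem.Int.floordiv ((N : ℤ) + 1) 2 = (((N + 1) / 2 : ℕ) : ℤ) := by
      have := PySem.Int.floordiv_natCast (N + 1) 2
      push_cast at this ⊢
      exact this
    have hdiv : PySem.Int.floordiv (3 * (pvLoop (N : Int)).1) 3 = (pvLoop (N : Int)).1 := by
      rw [PySem.Int.floordiv_eq_ediv_of_pos (by norm_num)]
      exact Int.mul_ediv_cancel_left _ (by norm_num)
    simp only [hm, hk]
    rw [← hA, hdiv, hB]
    ring_nf
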